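-- pv_equiv track=rewrite | github.com/zhaozhiwei1992/python | utils/小工具/convert_md_to_org.py | convert_blockquotes
-- ===== SOURCE A (Python) =====
-- def convert_blockquotes(content):
--     """转换引用块 > 为 Org 模式"""
--     lines = content.split('\n')
--     converted_lines = []
--
--     for line in lines:
--         # 匹配以 > 开头的引用
--         if line.startswith('>'):
--             # 转换为 Org 模式：#+BEGIN_QUOTE
--             converted_lines.append(f'#+BEGIN_QUOTE')
--             # 去掉 > 前缀，并去掉多余空格
--             quoted_text = line[1:].strip()
--             converted_lines.append(quoted_text)
--         else:
--             converted_lines.append(line)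
--
--     return '\n'.join(converted_lines)
-- ===== SOURCE B (Python) =====
-- def convert_blockquotes(content):
--     """转换引用块 > 为 Org 模式"""
--     # Single streaming scan over the characters: no lines list, no join.
--     out = []
--     at_start = True
--     i = 0
--     n = len(content)
--     while i < n:
--         c = content[i]
--         if at_start and c == '>':
--             j = i + 1
--             while j < n and content[j] != '\n':
--                 j += 1
--             out.append('#+BEGIN_QUOTE\n')
--             out.append(content[i + 1:j].strip())
--             i = j
--             at_start = False
--         else:
--             out.append(c)
--             at_start = (c == '\n')
--             i += 1
--     return ''.join(out)
-- ===== Notes on version B (the rewrite author's own statement) =====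
-- stated objective: alternative
-- what changed: Replaces A's split-into-lines / per-line rewrite / join pipeline by a single streaming character scan that tracks an at-line-start flag and rewrites a blockquote line in place, never materialising a list of lines.
import Mathlib
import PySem

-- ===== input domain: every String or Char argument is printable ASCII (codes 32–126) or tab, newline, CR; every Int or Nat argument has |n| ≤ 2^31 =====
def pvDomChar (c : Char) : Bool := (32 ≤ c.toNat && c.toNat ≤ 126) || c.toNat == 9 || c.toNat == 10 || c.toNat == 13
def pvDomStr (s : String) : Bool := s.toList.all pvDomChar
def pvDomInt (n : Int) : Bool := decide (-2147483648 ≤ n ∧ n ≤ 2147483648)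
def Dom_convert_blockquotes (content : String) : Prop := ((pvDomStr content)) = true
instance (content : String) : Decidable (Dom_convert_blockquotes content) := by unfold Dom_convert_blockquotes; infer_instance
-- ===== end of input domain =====

-- B replaces A's split-into-lines / per-line rewrite / join pipeline by one streaming
-- character scan with an at-line-start flag (alternative structure, same cost).

-- ===== PORT A =====
def convert_blockquotes (content : String) : String :=
  let lines := (PySem.Str.split? content "\n").getD []
  let converted_lines := lines.foldl (fun acc line =>
    if PySem.Str.startswith line ">" then
      acc ++ ["#+BEGIN_QUOTE", PySem.Str.strip (PySem.Str.slice line (some 1) none)]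
    else
      acc ++ [line]) ([] : List String)
  PySem.Str.join "\n" converted_lines

-- ===== PORT B =====
-- streaming scan: `atStart` = we are at the start of a line; on '>' there, consume
-- the rest of the line (Python's inner `while j` scan = takeWhile/dropWhile).
def pvGoB : Bool → List Char → List Char
  | _, [] => []
  | atStart, c :: rest =>
    if atStart && (c == '>') then
      "#+BEGIN_QUOTE\n".toList ++ PySem.Chars.strip (rest.takeWhile (fun x => !(x == '\n')))
        ++ pvGoB false (rest.dropWhile (fun x => !(x == '\n')))
    else
      c :: pvGoB (c == '\n') rest
termination_by _ cs => cs.length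
decreasing_by
  · exact Nat.lt_succ_of_le (List.length_dropWhile_le _ _)
  · exact Nat.lt_succ_self _

def convert_blockquotes_alt (content : String) : String :=
  String.ofList (pvGoB true content.toList)

-- ===== PRECONDITION & SPEC =====
def Spec_convert_blockquotes (content : String) (out : String) : Prop := out = convert_blockquotes_alt content
instance (content : String) (out : String) : Decidable (Spec_convert_blockquotes content out) := by unfold Spec_convert_blockquotes; infer_instance

-- ===== CLAIM (what is proved, stated in full; the proofs are below) =====
def Claim_equal_convert_blockquotes : Prop := ∀ (content : String), Dom_convert_blockquotes content → Spec_convert_blockquotes content (convert_blockquotes content)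

-- ===== LEMMAS AND PROOFS =====

-- simple recursive split at '\n' (proof-side model of Chars.splitOn)
def pvSplit : List Char → List (List Char)
  | [] => [[]]
  | c :: rest => if c = '\n' then [] :: pvSplit rest else (pvSplit rest).modifyHead (c :: ·)

-- per-line rewrite (proof-side model of A's loop body, at the Chars level)
def pvProc (line : List Char) : List (List Char) :=
  if PySem.Chars.startswith line ['>'] then
    ["#+BEGIN_QUOTE".toList, PySem.Chars.strip (line.drop 1)]
  else [line]

def pvProc' (line : List Char) : List Char :=
  if PySem.Chars.startswith line ['>'] then
    "#+BEGIN_QUOTE".toList ++ '\n' :: PySem.Chars.strip (line.drop 1)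
  else line

def pvSpecJoin : List (List Char) → List Char
  | [] => []
  | [l] => pvProc' l
  | l :: ls => pvProc' l ++ '\n' :: pvSpecJoin ls

theorem pvSplit_ne_nil (l : List Char) : pvSplit l ≠ [] := by
  induction l with
  | nil => simp [pvSplit]
  | cons c rest ih =>
    simp only [pvSplit]
    split_ifs
    · simp
    · cases h : pvSplit rest with
      | nil => exact absurd h ih
      | cons a b => simp

theorem pv_go_spec (fuel : Nat) : ∀ (l cur : List Char) (acc : List (List Char)),
    l.length < fuel →
    PySem.Chars.splitOn.go ['\n'] fuel l cur acc
      = acc.reverse ++ (pvSplit l).modifyHead (cur.reverse ++ ·) := by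
  induction fuel with
  | zero => intro l cur acc h; omega
  | succ fuel ih =>
    intro l cur acc h
    cases l with
    | nil =>
      rw [PySem.Chars.splitOn.go.eq_def]
      simp [pvSplit]
    | cons c rest =>
      rw [PySem.Chars.splitOn.go.eq_def]
      simp only []
      by_cases hc : c = '\n'
      · subst hc
        have hp : List.isPrefixOf ['\n'] ('\n' :: rest) = true := by
          simp [List.isPrefixOf]
        rw [if_pos hp, List.length_singleton, List.drop_succ_cons, List.drop_zero,
          ih rest [] (cur.reverse :: acc) (by simpa using Nat.lt_of_succ_lt_succ h)]
        simp [pvSplit]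
        cases hs : pvSplit rest with
        | nil => exact absurd hs (pvSplit_ne_nil rest)
        | cons a b => simp
      · have hp : List.isPrefixOf ['\n'] (c :: rest) = false := by
          simp [List.isPrefixOf]
          intro hcc; exact absurd hcc.symm hc
        simp only [hp, Bool.false_eq_true, if_false]
        rw [ih rest (c :: cur) acc (by simpa using Nat.lt_of_succ_lt_succ h)]
        simp [pvSplit, hc, List.modifyHead_modifyHead]
        cases hs : pvSplit rest with
        | nil => exact absurd hs (pvSplit_ne_nil rest)
        | cons a b => simp [Function.comp]
  
theorem pv_splitOn_eq (s : List Char) : PySem.Chars.splitOn s ['\n'] = pvSplit s := by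
  have := pv_go_spec (s.length + 1) s [] [] (Nat.lt_succ_self _)
  simp only [PySem.Chars.splitOn] at *
  rw [this]
  cases hs : pvSplit s with
  | nil => exact absurd hs (pvSplit_ne_nil s)
  | cons a b => simp

theorem pvSplit_no_nl {t : List Char} (h : '\n' ∉ t) : pvSplit t = [t] := by
  induction t with
  | nil => rfl
  | cons c rest ih =>
    simp at h
    have hc : ¬ c = '\n' := fun hh => h.1 hh.symm
    simp [pvSplit, hc, ih h.2]

theorem pvSplit_append_nl {t : List Char} (rest : List Char) (h : '\n' ∉ t) :
    pvSplit (t ++ '\n' :: rest) = t :: pvSplit rest := by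
  induction t with
  | nil => simp [pvSplit]
  | cons c tt ih =>
    simp at h
    have hc : ¬ c = '\n' := fun hh => h.1 hh.symm
    simp [pvSplit, hc, ih h.2]

theorem pvGoB_false_append {t : List Char} (l' : List Char) (h : '\n' ∉ t) :
    pvGoB false (t ++ l') = t ++ pvGoB false l' := by
  induction t with
  | nil => simp
  | cons c tt ih =>
    simp at h
    have hc : (c == '\n') = false := by
      simp; exact fun hh => h.1 hh.symm
    simp [pvGoB, hc, ih h.2]

theorem pvSpecJoin_cons (l : List Char) (ls : List (List Char)) (h : ls ≠ []) :
    pvSpecJoin (l :: ls) = pvProc' l ++ '\n' :: pvSpecJoin ls := by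
  cases ls with
  | nil => exact absurd rfl h
  | cons a b => rfl

theorem pvGoB_step (atStart : Bool) (c : Char) (rest : List Char) :
    pvGoB atStart (c :: rest) =
      if atStart && (c == '>') then
        "#+BEGIN_QUOTE\n".toList ++ PySem.Chars.strip (rest.takeWhile (fun x => !(x == '\n')))
          ++ pvGoB false (rest.dropWhile (fun x => !(x == '\n')))
      else c :: pvGoB (c == '\n') rest := by
  rw [pvGoB]

theorem pvBQ : ("#+BEGIN_QUOTE\n".toList : List Char) = "#+BEGIN_QUOTE".toList ++ ['\n'] := by
  decide

theorem pv_startswith_gt (t : List Char) :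
    PySem.Chars.startswith ('>' :: t) ['>'] = true := by
  simp [PySem.Chars.startswith, List.isPrefixOf]

theorem pv_startswith_not {c : Char} (t : List Char) (h : ¬ c = '>') :
    PySem.Chars.startswith (c :: t) ['>'] = false := by
  simp [PySem.Chars.startswith, List.isPrefixOf]
  exact fun hh => h hh.symm

theorem pv_startswith_nil : PySem.Chars.startswith [] ['>'] = false := by
  decide

theorem pv_nl_not_mem_takeWhile (l : List Char) :
    '\n' ∉ l.takeWhile (fun x => !(x == '\n')) := by
  intro hm
  have := List.mem_takeWhile_imp hm
  simp at this

theorem pv_dropWhile_shape (l : List Char) :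
    l.dropWhile (fun x => !(x == '\n')) = [] ∨
      ∃ r, l.dropWhile (fun x => !(x == '\n')) = '\n' :: r := by
  induction l with
  | nil => left; rfl
  | cons c rest ih =>
    by_cases hc : c = '\n'
    · subst hc
      right; exact ⟨rest, by simp⟩
    · rw [List.dropWhile_cons, if_pos (by simp [hc])]
      exact ih

theorem pvG1_aux : ∀ (n : Nat) (cs : List Char), cs.length ≤ n →
    pvGoB true cs = pvSpecJoin (pvSplit cs) := by
  intro n
  induction n with
  | zero =>
    intro cs h
    have : cs = [] := by cases cs <;> simp_all
    subst this
    rw [show pvGoB true ([] : List Char) = [] from by rw [pvGoB]]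
    simp [pvSplit, pvSpecJoin, pvProc', pv_startswith_nil]
  | succ n ih =>
    intro cs h
    cases cs with
    | nil =>
      rw [show pvGoB true ([] : List Char) = [] from by rw [pvGoB]]
      simp [pvSplit, pvSpecJoin, pvProc', pv_startswith_nil]
    | cons c rest =>
      have htake := pv_nl_not_mem_takeWhile rest
      have hsplit := List.takeWhile_append_dropWhile
        (p := fun x => !(x == '\n')) (l := rest)
      by_cases hgt : c = '>'
      · subst hgt
        rw [pvGoB_step, if_pos (by simp)]
        rcases pv_dropWhile_shape rest with hd | ⟨r2, hd⟩
        · -- no newline after the '>' line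
          rw [hd] at hsplit
          simp only [List.append_nil] at hsplit
          have hnr : '\n' ∉ rest := hsplit ▸ htake
          have hnn : '\n' ∉ '>' :: rest := by simp [hnr]
          rw [hd, pvSplit_no_nl hnn]
          show _ = pvProc' ('>' :: rest)
          rw [pvProc', if_pos (pv_startswith_gt rest)]
          simp [pvBQ, hsplit, pvGoB]
        · -- line ends at a newline, continue with r2
          have hrest : rest = rest.takeWhile (fun x => !(x == '\n')) ++ '\n' :: r2 := by
            rw [← hd, hsplit]
          have hnn : '\n' ∉ '>' :: rest.takeWhile (fun x => !(x == '\n')) := by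
            simp
            exact htake
          have hlen : r2.length ≤ n := by
            have hlr : rest.length
                = (rest.takeWhile (fun x => !(x == '\n'))).length + r2.length + 1 := by
              conv_lhs => rw [hrest]
              simp
              omega
            simp at h
            omega
          have hps : pvSplit ('>' :: rest)
              = ('>' :: rest.takeWhile (fun x => !(x == '\n'))) :: pvSplit r2 := by
            conv_lhs => rw [hrest]
            exact pvSplit_append_nl r2 hnn
          rw [hd, hps, pvSpecJoin_cons _ _ (pvSplit_ne_nil r2)]
          rw [show pvGoB false ('\n' :: r2) = '\n' :: pvGoB true r2 from by
            rw [pvGoB_step, if_neg (by simp)]; simp]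
          rw [ih r2 hlen, pvProc', if_pos (pv_startswith_gt _)]
          simp [pvBQ]
      · -- first char is not '>'
        rw [pvGoB_step, if_neg (by simp [hgt])]
        by_cases hc : c = '\n'
        · subst hc
          have hlen : rest.length ≤ n := by simp at h; omega
          simp only [beq_self_eq_true]
          rw [ih rest hlen]
          rw [show pvSplit ('\n' :: rest) = [] :: pvSplit rest from by simp [pvSplit]]
          rw [pvSpecJoin_cons _ _ (pvSplit_ne_nil rest), pvProc', if_neg (by simp [pv_startswith_nil])]
          simp
        · have hcb : (c == '\n') = false := by simp [hc]
          rw [hcb]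
          rcases pv_dropWhile_shape rest with hd | ⟨r2, hd⟩
          · rw [hd] at hsplit
            simp only [List.append_nil] at hsplit
            have hnr : '\n' ∉ rest := hsplit ▸ htake
            have hnn : '\n' ∉ c :: rest := by
              simp [hnr]
              exact fun hh => hc hh.symm
            have hgb : pvGoB false rest = rest := by
              have := pvGoB_false_append (t := rest) [] hnr
              rw [show pvGoB false ([] : List Char) = [] from by rw [pvGoB]] at this
              simpa using this
            rw [hgb, pvSplit_no_nl hnn]
            show _ = pvProc' (c :: rest)
            rw [pvProc', if_neg (by simp [pv_startswith_not rest hgt])]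
          · have hrest : rest = rest.takeWhile (fun x => !(x == '\n')) ++ '\n' :: r2 := by
              rw [← hd, hsplit]
            have hlen : r2.length ≤ n := by
              have hlr : rest.length
                  = (rest.takeWhile (fun x => !(x == '\n'))).length + r2.length + 1 := by
                conv_lhs => rw [hrest]
                simp
                omega
              simp at h
              omega
            have hnn : '\n' ∉ c :: rest.takeWhile (fun x => !(x == '\n')) := by
              simp [htake]
              exact fun hh => hc hh.symm
            have hps : pvSplit (c :: rest)
                = (c :: rest.takeWhile (fun x => !(x == '\n'))) :: pvSplit r2 := by
              conv_lhs => rw [hrest]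
              exact pvSplit_append_nl r2 hnn
            have hgb : pvGoB false rest
                = rest.takeWhile (fun x => !(x == '\n')) ++ '\n' :: pvGoB true r2 := by
              conv_lhs => rw [hrest]
              rw [pvGoB_false_append _ htake]
              rw [pvGoB_step, if_neg (by simp)]
              simp
            rw [hgb, ih r2 hlen, hps, pvSpecJoin_cons _ _ (pvSplit_ne_nil r2)]
            rw [pvProc', if_neg (by simp [pv_startswith_not _ hgt])]
            simp

theorem pvG1 (cs : List Char) : pvGoB true cs = pvSpecJoin (pvSplit cs) :=
  pvG1_aux cs.length cs le_rfl

theorem pv_join_append (sep : List Char) (xs ys : List (List Char)) (hx : xs ≠ []) (hy : ys ≠ []) :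
    PySem.Chars.join sep (xs ++ ys) = PySem.Chars.join sep xs ++ sep ++ PySem.Chars.join sep ys := by
  induction xs with
  | nil => exact absurd rfl hx
  | cons x xt ih =>
    cases xt with
    | nil =>
      cases ys with
      | nil => exact absurd rfl hy
      | cons y yt => simp [PySem.Chars.join_cons_cons, PySem.Chars.join_singleton]
    | cons x2 xt2 =>
      simp only [List.cons_append]
      rw [PySem.Chars.join_cons_cons]
      rw [show x2 :: (xt2 ++ ys) = (x2 :: xt2) ++ ys from rfl, ih (by simp), PySem.Chars.join_cons_cons]
      simp [List.append_assoc]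

theorem pv_proc_ne_nil (l : List Char) : pvProc l ≠ [] := by
  rw [pvProc]
  split_ifs <;> simp

theorem pv_join_proc (l : List Char) :
    PySem.Chars.join ['\n'] (pvProc l) = pvProc' l := by
  rw [pvProc, pvProc']
  split_ifs
  · rw [PySem.Chars.join_cons_cons, PySem.Chars.join_singleton]
    simp
  · rw [PySem.Chars.join_singleton]

theorem pv_join_flatMap (ls : List (List Char)) :
    PySem.Chars.join ['\n'] (ls.flatMap pvProc) = pvSpecJoin ls := by
  induction ls with
  | nil => simp [pvSpecJoin, PySem.Chars.join_nil]
  | cons l ls ih =>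
    cases ls with
    | nil =>
      simp only [List.flatMap_cons, List.flatMap_nil, List.append_nil]
      rw [pv_join_proc]
      rfl
    | cons l2 ls2 =>
      rw [List.flatMap_cons,
        pv_join_append ['\n'] (pvProc l) ((l2 :: ls2).flatMap pvProc) (pv_proc_ne_nil l)
          (by
            intro hh
            rw [List.flatMap_cons] at hh
            rcases List.append_eq_nil_iff.mp hh with ⟨h1, _⟩
            exact pv_proc_ne_nil l2 h1),
        pv_join_proc, ih, pvSpecJoin_cons l (l2 :: ls2) (by simp)]
      simp

theorem pv_lines (content : String) :
    (PySem.Str.split? content "\n").getD [] = (pvSplit content.toList).map String.ofList := by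
  rw [PySem.Str.split?.eq_1]
  rw [show ("\n" : String).toList = ['\n'] from rfl]
  rw [PySem.Chars.split?, if_neg (by simp)]
  rw [pv_splitOn_eq]
  rfl

theorem pv_main (content : String) : convert_blockquotes content = convert_blockquotes_alt content := by
  have key : (convert_blockquotes content).toList = (convert_blockquotes_alt content).toList := by
    rw [convert_blockquotes, convert_blockquotes_alt, String.toList_ofList]
    rw [pv_lines]
    rw [show (fun (acc : List String) (line : String) =>
        if PySem.Str.startswith line ">" then
          acc ++ ["#+BEGIN_QUOTE", PySem.Str.strip (PySem.Str.slice line (some 1) none)]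
        else acc ++ [line])
      = (fun acc line => acc ++ (if PySem.Str.startswith line ">" then
          ["#+BEGIN_QUOTE", PySem.Str.strip (PySem.Str.slice line (some 1) none)]
        else [line])) from by funext acc line; split_ifs <;> rfl]
    rw [PySem.List.foldl_append_eq_flatMap, List.nil_append]
    rw [PySem.Str.toList_join, List.map_flatMap, List.flatMap_map]
    rw [show (fun lc => List.map String.toList
          (if PySem.Str.startswith (String.ofList lc) ">" then
            ["#+BEGIN_QUOTE", PySem.Str.strip (PySem.Str.slice (String.ofList lc) (some 1) none)]
          else [String.ofList lc])) = pvProc from by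
      funext lc
      rw [pvProc]
      rw [show PySem.Str.startswith (String.ofList lc) ">"
            = PySem.Chars.startswith lc ['>'] from by
        rw [PySem.Str.startswith_eq, String.toList_ofList]; rfl]
      split_ifs
      · simp only [List.map_cons, List.map_nil, PySem.Str.toList_strip, PySem.Str.toList_slice,
          String.toList_ofList, PySem.Chars.slice_eq_listSlice]
        rw [PySem.List.slice_from lc (a := 1) (by norm_num)]
        rfl
      · simp]
    rw [show ("\n" : String).toList = ['\n'] from rfl]
    rw [pv_join_flatMap, pvG1 content.toList]
  calc convert_blockquotes content
      = String.ofList (convert_blockquotes content).toList := by rw [String.ofList_toList]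
    _ = String.ofList (convert_blockquotes_alt content).toList := by rw [key]
    _ = convert_blockquotes_alt content := by rw [String.ofList_toList]

-- ===== VERDICT (by name: the statement is the Claim_ definition above) =====
theorem convert_blockquotes_spec : Claim_equal_convert_blockquotes := by
  intro content _
  unfold Spec_convert_blockquotes
  exact pv_main content
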